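-- pv_equiv track=rewrite | github.com/bellDev-code/Challenge_Algorithm | programmers/Ohsulgi/today04/02-todayChallenge.py | solution
-- ===== SOURCE A (Python) =====
-- def solution(strArr):
--     arr = {}
--     for i in strArr:
--         if len(i) not in arr:
--             arr[len(i)] = 1
--         else:
--             arr[len(i)] += 1
--     return max(arr.values())
-- ===== SOURCE B (Python) =====
-- def solution(strArr):
--     lengths = sorted(len(s) for s in strArr)
--     best = 0
--     cur = 0
--     prev = None
--     for L in lengths:
--         cur = cur + 1 if L == prev else 1
--         if cur > best:
--             best = cur
--         prev = L
--     return best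
-- ===== Notes on version B (the rewrite author's own statement) =====
-- stated objective: alternative
-- what changed: B replaces A's dict-of-counts aggregation by sort-then-scan: it sorts the lengths so equal lengths become adjacent and takes the longest run in one linear scan, no dictionary at all.
-- outside the precondition, e.g. on solution([]): A raises ValueError, B returns 0
import Mathlib
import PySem

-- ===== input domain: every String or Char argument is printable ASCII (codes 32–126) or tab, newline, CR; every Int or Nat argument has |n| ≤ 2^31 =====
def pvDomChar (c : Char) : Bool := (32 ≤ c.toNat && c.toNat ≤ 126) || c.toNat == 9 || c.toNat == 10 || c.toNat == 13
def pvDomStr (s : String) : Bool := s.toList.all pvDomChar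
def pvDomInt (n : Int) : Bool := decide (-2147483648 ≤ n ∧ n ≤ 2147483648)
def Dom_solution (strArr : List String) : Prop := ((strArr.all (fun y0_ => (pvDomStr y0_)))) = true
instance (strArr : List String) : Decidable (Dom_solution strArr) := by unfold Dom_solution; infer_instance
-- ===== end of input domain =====

-- B replaces A's dict-of-counts aggregation by sort-then-scan: sort the lengths, take the longest run of equal
-- adjacent lengths in one linear scan (alternative algorithm, no dictionary).

-- ===== PORT A =====
def solution (strArr : List String) : Int :=
  let arr := strArr.foldl (fun d i =>
    if (PySem.Dict.contains d (PySem.Str.len i)) = false then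
      PySem.Dict.insert d (PySem.Str.len i) (1 : Int)
    else
      PySem.Dict.modify d (PySem.Str.len i) 0 (· + 1)) PySem.Dict.empty
  ((PySem.List.max? (PySem.Dict.values arr) (fun x => x)).getD 0)

-- ===== PORT B =====
-- B-side helper: the loop body of Source B (state = (best, cur, prev)).
def bStep (s : Int × Int × Option Int) (l : Int) : Int × Int × Option Int :=
  let cur := if some l = s.2.2 then s.2.1 + 1 else 1
  ((if cur > s.1 then cur else s.1), cur, some l)

def solution_alt (strArr : List String) : Int :=
  let lengths := PySem.List.sorted (strArr.map (fun s => PySem.Str.len s)) (fun x => x) false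
  (lengths.foldl bStep (0, 0, none)).1

-- ===== PRECONDITION & SPEC =====
-- Pre_ excludes only the empty list, on which Python A raises ValueError (max() of an empty sequence).
def Pre_solution (strArr : List String) : Prop := strArr ≠ []
instance (strArr : List String) : Decidable (Pre_solution strArr) := by unfold Pre_solution; infer_instance
def pvWitness_solution : List String := (["a", "bb", "c"])

def Spec_solution (strArr : List String) (out : Int) : Prop := out = solution_alt strArr
instance (strArr : List String) (out : Int) : Decidable (Spec_solution strArr out) := by unfold Spec_solution; infer_instance

-- ===== CLAIM (what is proved, stated in full; the proofs are below) =====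
def Claim_equal_solution : Prop := ∀ (strArr : List String), Dom_solution strArr → Pre_solution strArr → Spec_solution strArr (solution strArr)

-- ===== LEMMAS AND PROOFS =====

-- A's loop body is exactly the Counter step: on a missing key, insert k 1 = modify k 0 (+1).
theorem stepA_eq_counter_step (d : PySem.Dict Int Int) (k : Int) :
    (if (PySem.Dict.contains d k) = false then PySem.Dict.insert d k (1 : Int)
     else PySem.Dict.modify d k 0 (· + 1)) = PySem.Dict.modify d k 0 (· + 1) := by
  by_cases h : PySem.Dict.contains d k = false
  · simp only [h, if_pos]
    simp [PySem.Dict.modify, PySem.Dict.getD_of_not_contains d (0 : Int) h]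
  · simp [h]

-- A's whole loop therefore builds Counter(lengths).
theorem foldA_eq_counter (strArr : List String) :
    strArr.foldl (fun d i =>
      if (PySem.Dict.contains d (PySem.Str.len i)) = false then
        PySem.Dict.insert d (PySem.Str.len i) (1 : Int)
      else
        PySem.Dict.modify d (PySem.Str.len i) 0 (· + 1)) PySem.Dict.empty
    = PySem.Dict.counter (strArr.map (fun s => PySem.Str.len s)) := by
  rw [PySem.Dict.counter_eq_foldl, List.foldl_map]
  exact PySem.List.foldl_congr_mem _ _ _ _ (fun d i _ => stepA_eq_counter_step d (PySem.Str.len i))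

-- bStep's best component is a running max.
theorem bStep_eq (s : Int × Int × Option Int) (l : Int) :
    bStep s l = (max s.1 (if some l = s.2.2 then s.2.1 + 1 else 1),
                 (if some l = s.2.2 then s.2.1 + 1 else 1), some l) := by
  unfold bStep
  simp only []
  congr 1
  omega

-- the best component accumulates by max.
theorem foldB_fst_max (T : List Int) : ∀ (M₁ M₂ c : Int) (p : Option Int),
    (T.foldl bStep (max M₁ M₂, c, p)).1 = max M₁ (T.foldl bStep (M₂, c, p)).1 := by
  induction T with
  | nil => intro _ _ _ _; rfl
  | cons l T ih =>
    intro M₁ M₂ c p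
    simp only [List.foldl_cons, bStep_eq, max_assoc]
    rw [ih]

-- a run of equal values from a matching prev extends cur and best.
theorem foldB_replicate (n : Nat) (hn : 1 ≤ n) : ∀ (M c : Int) (a : Int),
    (List.replicate n a).foldl bStep (M, c, some a) = (max M (c + n), c + n, some a) := by
  induction n with
  | zero => omega
  | succ m ih =>
    intro M c a
    rcases Nat.eq_zero_or_pos m with h | h
    · subst h
      simp [bStep_eq]
    · simp only [List.replicate_succ, List.foldl_cons, bStep_eq]
      rw [ih h]
      refine Prod.ext ?_ (Prod.ext ?_ rfl) <;> simp only [if_true] <;> push_cast <;> omega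

-- a run of equal values from the initial state.
theorem foldB_repl0 (n : Nat) (hn : 1 ≤ n) (a : Int) :
    (List.replicate n a).foldl bStep (0, 0, none) = ((n : Int), (n : Int), some a) := by
  obtain ⟨m, rfl⟩ : ∃ m, n = m + 1 := ⟨n - 1, by omega⟩
  have h1 : bStep (0, 0, none) a = (1, 1, some a) := by simp [bStep]
  rw [List.replicate_succ, List.foldl_cons, h1]
  rcases Nat.eq_zero_or_pos m with h | h
  · subst h; norm_num
  · rw [foldB_replicate m h]
    refine Prod.ext ?_ (Prod.ext ?_ rfl) <;> push_cast <;> omega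

-- main invariant: on a sorted list, the scan's best is the maximum multiplicity.
theorem foldB_main (n : Nat) : ∀ (S : List Int), S.length ≤ n → S.Pairwise (· ≤ ·) → S ≠ [] →
    (∃ k ∈ S, (S.count k : Int) = (S.foldl bStep (0, 0, none)).1) ∧
    (∀ k ∈ S, (S.count k : Int) ≤ (S.foldl bStep (0, 0, none)).1) := by
  induction n with
  | zero =>
    intro S hlen _ hne
    cases S with
    | nil => exact absurd rfl hne
    | cons a S' => simp at hlen
  | succ n ih =>
    intro S hlen hsorted hne
    obtain ⟨a, S', rfl⟩ := List.exists_cons_of_ne_nil hne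
    have hAT : (a :: S').takeWhile (fun x => x == a) ++ (a :: S').dropWhile (fun x => x == a)
        = a :: S' := List.takeWhile_append_dropWhile
    set A := (a :: S').takeWhile (fun x => x == a) with hA
    set T := (a :: S').dropWhile (fun x => x == a) with hT
    have hAmem : ∀ b ∈ A, b = a := by
      intro b hb
      have := List.mem_takeWhile_imp hb
      simpa using this
    have hArepl : A = List.replicate A.length a := List.eq_replicate_of_mem hAmem
    have hAcons : A = a :: S'.takeWhile (fun x => x == a) := by
      simp [hA]
    have hAlen : 1 ≤ A.length := by rw [hAcons]; simp
    have hle : ∀ x ∈ S', a ≤ x := fun x hx => (List.pairwise_cons.mp hsorted).1 x hx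
    have hTsorted : T.Pairwise (· ≤ ·) := hsorted.sublist (List.dropWhile_sublist _)
    have haT : ∀ k ∈ T, a < k := by
      intro k hk
      cases hTc : T with
      | nil => rw [hTc] at hk; simp at hk
      | cons t ts =>
        have hpt : ¬ (t == a) = true := by
          have h0 : 0 < T.length := by rw [hTc]; simp
          have := List.dropWhile_get_zero_not (p := fun x => x == a) (a :: S') (by rw [← hT] at *; exact h0)
          simpa [← hT, hTc] using this
        have hta : t ≠ a := by simpa using hpt
        have htT : t ∈ T := by rw [hTc]; exact List.mem_cons_self
        have hsub : List.Sublist T (a :: S') := by rw [hT]; exact List.dropWhile_sublist _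
        have htmem : t ∈ a :: S' := hsub.subset htT
        have hat : a ≤ t := by
          rcases List.mem_cons.mp htmem with h | h
          · omega
          · exact hle t h
        have halt : a < t := lt_of_le_of_ne hat (fun h => hta h.symm)
        rw [hTc] at hk
        rcases List.mem_cons.mp hk with h | h
        · omega
        · have : t ≤ k := by
            rw [hTc] at hTsorted
            exact (List.pairwise_cons.mp hTsorted).1 k h
          omega
    have hanotT : a ∉ T := fun h => absurd (haT a h) (lt_irrefl a)
    have hcountA : (a :: S').count a = A.length := by
      rw [← hAT, List.count_append, hArepl, List.count_replicate_self,
        List.count_eq_zero.mpr hanotT]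
      simp
    have hcountT : ∀ k ∈ T, (a :: S').count k = T.count k := by
      intro k hk
      have hka : k ≠ a := by have := haT k hk; omega
      rw [← hAT, List.count_append, List.count_eq_zero.mpr (fun hc => hka (hAmem k hc))]
      omega
    have hfoldA : (a :: S').foldl bStep (0, 0, none)
        = T.foldl bStep ((A.length : Int), (A.length : Int), some a) := by
      rw [← hAT, List.foldl_append]
      congr 1
      rw [hArepl] at hAlen ⊢
      simp only [List.length_replicate] at *
      exact foldB_repl0 _ hAlen a
    cases hTc : T with
    | nil =>
      rw [hTc] at hfoldA
      simp only [List.foldl_nil] at hfoldA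
      rw [hfoldA]
      constructor
      · exact ⟨a, List.mem_cons_self, by rw [hcountA]⟩
      · intro k hk
        have hkA : k ∈ A := by rw [← hAT, hTc, List.append_nil] at hk; exact hk
        rw [hAmem k hkA, hcountA]
    | cons t ts =>
      have hta : t ≠ a := by
        have := haT t (by rw [hTc]; exact List.mem_cons_self); omega
      have hTlen : T.length ≤ n := by
        have : A.length + T.length = S'.length + 1 := by
          rw [← List.length_append, hAT]; simp
        simp only [List.length_cons] at hlen
        omega
      have hTne : T ≠ [] := by rw [hTc]; simp
      obtain ⟨⟨k0, hk0T, hk0⟩, hubT⟩ := ih T hTlen hTsorted hTne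
      -- unfold the first step of the scan over T, from each of the two initial states
      have hstep1 : T.foldl bStep ((A.length : Int), (A.length : Int), some a)
          = ts.foldl bStep (max (A.length : Int) 1, 1, some t) := by
        rw [hTc, List.foldl_cons,
          show bStep ((A.length : Int), (A.length : Int), some a) t
            = (max (A.length : Int) 1, 1, some t) by
              simp [bStep_eq, hta]]
      have hstep2 : T.foldl bStep (0, 0, none) = ts.foldl bStep (1, 1, some t) := by
        rw [hTc, List.foldl_cons,
          show bStep (0, 0, none) t = (1, 1, some t) by simp [bStep]]
      have hmax : ((a :: S').foldl bStep (0, 0, none)).1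
          = max (A.length : Int) (T.foldl bStep (0, 0, none)).1 := by
        rw [hfoldA, hstep1, hstep2, foldB_fst_max]
      constructor
      · rcases le_total (T.foldl bStep (0, 0, none)).1 (A.length : Int) with h | h
        · refine ⟨a, List.mem_cons_self, ?_⟩
          rw [hcountA, hmax, max_eq_left h]
        · refine ⟨k0, ?_, ?_⟩
          · rw [← hAT]; exact List.mem_append_right _ hk0T
          · rw [hcountT k0 hk0T, hk0, hmax, max_eq_right h]
      · intro k hk
        rw [hmax]
        rcases List.mem_append.mp (by rw [hAT]; exact hk) with h | h
        · rw [hAmem k h, hcountA]; exact le_max_left _ _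
        · rw [hcountT k h]
          exact le_trans (hubT k h) (le_max_right _ _)

-- ===== VERDICT (by name: the statement is the Claim_ definition above) =====
theorem solution_spec : Claim_equal_solution := by
  intro strArr _ hpre
  unfold Spec_solution solution solution_alt
  rw [foldA_eq_counter]
  set L := strArr.map (fun s => PySem.Str.len s) with hL
  have hLne : L ≠ [] := by
    rw [hL]; simpa using hpre
  set S := PySem.List.sorted L (fun x => x) false with hS
  have hperm : S.Perm L := PySem.List.sorted_perm L (fun x => x) false
  have hSsorted : S.Pairwise (· ≤ ·) := PySem.List.sorted_pairwise L (fun x => x)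
  have hSne : S ≠ [] := by rw [hS, Ne, PySem.List.sorted_eq_nil_iff]; exact hLne
  obtain ⟨⟨k0, hk0S, hk0⟩, hub⟩ := foldB_main S.length S le_rfl hSsorted hSne
  show (PySem.List.max? (PySem.Dict.counter L).values (fun x => x)).getD 0
      = (S.foldl bStep (0, 0, none)).1
  have hvals : (PySem.Dict.counter L).values
      = (PySem.Set.ofList L).map (fun k => (L.count k : Int)) := by
    simp [PySem.Dict.values, PySem.Dict.items_counter, List.map_map, Function.comp]
  rw [hvals]
  set V := (PySem.Set.ofList L).map (fun k => (L.count k : Int)) with hV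
  have hVne : V ≠ [] := by
    intro hc
    have hx : L.head hLne ∈ PySem.Set.ofList L :=
      (PySem.Set.mem_ofList _ _).mpr (List.head_mem hLne)
    rw [hV, List.map_eq_nil_iff] at hc
    rw [hc] at hx
    simp at hx
  obtain ⟨M, hM⟩ : ∃ M, PySem.List.max? V (fun x => x) = some M := by
    cases hc : PySem.List.max? V (fun x => x) with
    | none => exact absurd ((PySem.List.max?_eq_none_iff V (fun x => x)).mp hc) hVne
    | some M => exact ⟨M, rfl⟩
  rw [hM, Option.getD_some]
  have hMmem : M ∈ V := PySem.List.max?_mem hM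
  have hMub : ∀ v ∈ V, v ≤ M := fun v hv => PySem.List.max?_isMax hM v hv
  -- M ≤ scan result
  obtain ⟨k, hkSet, hkM⟩ := List.mem_map.mp (hV ▸ hMmem)
  have hkL : k ∈ L := (PySem.Set.mem_ofList _ _).mp hkSet
  have h1 : M ≤ (S.foldl bStep (0, 0, none)).1 := by
    rw [← hkM, ← hperm.count_eq]
    exact hub k (hperm.mem_iff.mpr hkL)
  -- scan result ≤ M
  have h2 : (S.foldl bStep (0, 0, none)).1 ≤ M := by
    rw [← hk0]
    have hk0L : k0 ∈ L := hperm.mem_iff.mp hk0S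
    rw [hperm.count_eq]
    exact hMub _ (List.mem_map.mpr ⟨k0, (PySem.Set.mem_ofList _ _).mpr hk0L, rfl⟩)
  omega
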